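-- pv_equiv track=rewrite | github.com/kim-donguk/Programmers | 1단계/L1_모의고사.py | solution
-- ===== SOURCE A (Python) =====
-- def solution(answers):
--     answer = []
--
--     one_person = [1,2,3,4,5]
--     two_person = [2,1,2,3,2,4,2,5]
--     three_person = [3,3,1,1,2,2,4,4,5,5]
--
--     count1 = 0
--     count2 = 0
--     count3 = 0
--
--     for i in range(len(answers)):
--         if(answers[i] == one_person[i % len(one_person)]):
--             count1 = count1 + 1
--         if(answers[i] == two_person[i % len(two_person)]):
--             count2 = count2 + 1
--         if(answers[i] == three_person[i % len(three_person)]):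
--             count3 = count3 + 1
--
--     answer_count = [count1, count2, count3]
--
--     for person, score in enumerate(answer_count):
--         if score == max(answer_count):
--             answer.append(person+1)
--
--     return answer
-- ===== SOURCE B (Python) =====
-- def solution(answers):
--     # Every guess pattern is cyclic with period dividing 40 (= lcm(5, 8, 10)), so a
--     # pattern's guess at position i depends only on i % 40.  Build ONE histogram of
--     # (i % 40, answer) pairs in a single pattern-independent pass; each score is then
--     # a sum of 40 table lookups, independent of the answers' length.
--     CYCLE = 40
--     hist = {}
--     for i, a in enumerate(answers):
--         key = (i % CYCLE, a)
--         hist[key] = hist.get(key, 0) + 1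
--     patterns = [
--         [1, 2, 3, 4, 5],
--         [2, 1, 2, 3, 2, 4, 2, 5],
--         [3, 3, 1, 1, 2, 2, 4, 4, 5, 5],
--     ]
--     scores = [sum(hist.get((r, pat[r % len(pat)]), 0) for r in range(CYCLE))
--               for pat in patterns]
--     best = max(scores)
--     return [k + 1 for k, s in enumerate(scores) if s == best]
-- ===== Notes on version B (the rewrite author's own statement) =====
-- stated objective: alternative
-- what changed: B never compares answers against the patterns while scanning: it builds one histogram keyed by (index mod 40, answer) in a single pattern-independent pass (40 = lcm of the pattern lengths), then reads each guesser's score off the table as a sum of 40 lookups, whereas A's single loop compares every answer against all three patterns with three counters.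
import Mathlib
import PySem

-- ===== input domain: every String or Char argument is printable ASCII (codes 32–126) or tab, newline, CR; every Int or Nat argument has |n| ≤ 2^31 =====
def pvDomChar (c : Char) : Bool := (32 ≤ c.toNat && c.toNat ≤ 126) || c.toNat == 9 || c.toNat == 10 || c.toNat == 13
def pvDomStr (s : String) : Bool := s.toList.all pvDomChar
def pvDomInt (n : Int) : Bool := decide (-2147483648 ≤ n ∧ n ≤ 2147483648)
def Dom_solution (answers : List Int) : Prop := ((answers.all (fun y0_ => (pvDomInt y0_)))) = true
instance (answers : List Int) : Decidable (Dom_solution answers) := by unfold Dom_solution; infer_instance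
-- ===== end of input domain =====

-- B replaces A's fused compare-against-three-patterns loop by one pattern-independent
-- histogram keyed by (index mod 40, answer) (40 = lcm of the pattern lengths); each score
-- is then a sum of 40 table lookups. Same asymptotic cost, different data structure.

-- ===== PORT A =====
def solution (answers : List Int) : List Int :=
  let one_person : List Int := [1,2,3,4,5]
  let two_person : List Int := [2,1,2,3,2,4,2,5]
  let three_person : List Int := [3,3,1,1,2,2,4,4,5,5]
  -- for i in range(len(answers)): three independent 'if … : countk += 1'
  let counts : Int × Int × Int :=
    (PySem.List.pyRange 0 (answers.length : Int) 1).foldl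
      (fun c i =>
        ((if PySem.List.pyGetD answers i 0
              = PySem.List.pyGetD one_person (PySem.Int.mod i (one_person.length : Int)) 0
          then c.1 + 1 else c.1),
         (if PySem.List.pyGetD answers i 0
              = PySem.List.pyGetD two_person (PySem.Int.mod i (two_person.length : Int)) 0
          then c.2.1 + 1 else c.2.1),
         (if PySem.List.pyGetD answers i 0
              = PySem.List.pyGetD three_person (PySem.Int.mod i (three_person.length : Int)) 0
          then c.2.2 + 1 else c.2.2)))
      (0, 0, 0)
  let answer_count : List Int := [counts.1, counts.2.1, counts.2.2]
  -- for person, score in enumerate(answer_count): if score == max(answer_count): answer.append(person+1)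
  (PySem.List.enumerate answer_count 0).foldl
    (fun acc p =>
      if p.2 = (PySem.List.max? answer_count (fun y => y)).getD 0 then acc ++ [p.1 + 1] else acc)
    []

-- ===== PORT B =====
def solution_alt (answers : List Int) : List Int :=
  let cycle : Int := 40
  -- hist[(i % 40, a)] += 1, one pass over enumerate(answers)
  let hist : PySem.Dict (Int × Int) Int :=
    (PySem.List.enumerate answers 0).foldl
      (fun d p =>
        d.insert (PySem.Int.mod p.1 cycle, p.2) (d.getD (PySem.Int.mod p.1 cycle, p.2) 0 + 1))
      PySem.Dict.empty
  let patterns : List (List Int) := [[1,2,3,4,5],[2,1,2,3,2,4,2,5],[3,3,1,1,2,2,4,4,5,5]]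
  -- sum(hist.get((r, pat[r % len(pat)]), 0) for r in range(40))
  let scores : List Int := patterns.map (fun pat =>
    ((PySem.List.pyRange 0 cycle 1).map
       (fun r => hist.getD (r, PySem.List.pyGetD pat (PySem.Int.mod r (pat.length : Int)) 0) 0)).sum)
  let best : Int := (PySem.List.max? scores (fun y => y)).getD 0
  ((PySem.List.enumerate scores 0).filter (fun p => p.2 == best)).map (fun p => p.1 + 1)

-- ===== PRECONDITION & SPEC =====
def Spec_solution (answers : List Int) (out : List Int) : Prop := out = solution_alt answers
instance (answers : List Int) (out : List Int) : Decidable (Spec_solution answers out) := by unfold Spec_solution; infer_instance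

-- ===== CLAIM =====
def Claim_equal_solution : Prop := ∀ (answers : List Int), Dom_solution answers → Spec_solution answers (solution answers)

-- ===== LEMMAS AND PROOFS =====

-- A's fused loop with three counters = three independent counts.
theorem foldl_triple_count (q1 q2 q3 : Int → Bool) :
    ∀ (l : List Int) (c1 c2 c3 : Int),
      l.foldl (fun c i =>
        ((if q1 i then c.1 + 1 else c.1),
         (if q2 i then c.2.1 + 1 else c.2.1),
         (if q3 i then c.2.2 + 1 else c.2.2))) (c1, c2, c3)
      = (c1 + (l.countP q1 : Int), c2 + (l.countP q2 : Int), c3 + (l.countP q3 : Int)) := by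
  intro l
  induction l with
  | nil => intro c1 c2 c3; simp
  | cons h t ih =>
    intro c1 c2 c3
    simp only [List.foldl_cons, ih, List.countP_cons]
    refine Prod.ext ?_ (Prod.ext ?_ ?_) <;> simp <;> split <;> ring

-- Summing a function that vanishes away from c over a duplicate-free list picks out f c.
theorem sum_map_single (f : Int → Int) :
    ∀ (l : List Int), l.Nodup → ∀ c, c ∈ l → (∀ r ∈ l, r ≠ c → f r = 0) →
      (l.map f).sum = f c := by
  intro l
  induction l with
  | nil => intro _ c hc; exact absurd hc (List.not_mem_nil)
  | cons a t ih =>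
    intro hnd c hc hz
    rcases List.mem_cons.mp hc with rfl | hct
    · have h0 : ∀ x ∈ t.map f, x = 0 := by
        intro x hx
        obtain ⟨r, hr, rfl⟩ := List.mem_map.mp hx
        exact hz r (List.mem_cons_of_mem _ hr) (fun h => (List.nodup_cons.mp hnd).1 (h ▸ hr))
      simp [List.sum_eq_zero h0]
    · have ha : f a = 0 :=
        hz a List.mem_cons_self (fun h => (List.nodup_cons.mp hnd).1 (h ▸ hct))
      simp [ha, ih (List.nodup_cons.mp hnd).2 c hct
        (fun r hr => hz r (List.mem_cons_of_mem _ hr))]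

-- Counting per residue class mod 40 and summing over the 40 classes counts everything once.
theorem count_partition (g h : Int → Int)
    (hgh : ∀ x : Int, 0 ≤ x → g (PySem.Int.mod x 40) = h x) :
    ∀ (l : List (Int × Int)), (∀ p ∈ l, 0 ≤ p.1) →
      ((PySem.List.pyRange 0 40 1).map (fun r =>
          (l.countP (fun p => (PySem.Int.mod p.1 40, p.2) == (r, g r)) : Int))).sum
        = (l.countP (fun p => p.2 == h p.1) : Int) := by
  intro l
  induction l with
  | nil => simp
  | cons a t ih =>
    intro hmem
    have ha : (0:Int) ≤ a.1 := hmem a List.mem_cons_self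
    have ht : ∀ p ∈ t, (0:Int) ≤ p.1 := fun p hp => hmem p (List.mem_cons_of_mem _ hp)
    have hc0 : (0:Int) ≤ PySem.Int.mod a.1 40 := PySem.Int.mod_nonneg a.1 (by norm_num)
    have hc1 : PySem.Int.mod a.1 40 < 40 := PySem.Int.mod_lt a.1 (by norm_num)
    have hsplit : ∀ r : Int,
        ((t.countP (fun p => (PySem.Int.mod p.1 40, p.2) == (r, g r))
            + (if (PySem.Int.mod a.1 40, a.2) == (r, g r) then 1 else 0) : Nat) : Int)
        = (t.countP (fun p => (PySem.Int.mod p.1 40, p.2) == (r, g r)) : Int)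
            + (if (PySem.Int.mod a.1 40, a.2) == (r, g r) then (1:Int) else 0) := by
      intro r; split <;> push_cast <;> ring
    simp only [List.countP_cons, hsplit, PySem.List.sum_map_add_int, ih ht]
    have hone :
        ((PySem.List.pyRange 0 40 1).map
          (fun r => (if (PySem.Int.mod a.1 40, a.2) == (r, g r) then (1:Int) else 0))).sum
        = (if a.2 == h a.1 then (1:Int) else 0) := by
      rw [sum_map_single _ _ (by decide) (PySem.Int.mod a.1 40)
            (PySem.List.mem_pyRange_one.mpr ⟨hc0, hc1⟩)
            (fun r _ hr => by
              simp only [Prod.mk.injEq, beq_iff_eq, ite_eq_right_iff, and_imp]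
              intro h1 _; exact absurd h1.symm hr)]
      simp only [Prod.mk.injEq, beq_iff_eq, true_and, hgh a.1 ha]
    rw [hone]
    split <;> push_cast <;> ring

-- The histogram built by B's single pass reads back as a residue-class count.
theorem hist_getD (answers : List Int) (v : Int × Int) :
    (((PySem.List.enumerate answers 0).foldl
        (fun d p =>
          d.insert (PySem.Int.mod p.1 40, p.2) (d.getD (PySem.Int.mod p.1 40, p.2) 0 + 1))
        PySem.Dict.empty).getD v 0)
      = ((PySem.List.enumerate answers 0).countP
          (fun p => (PySem.Int.mod p.1 40, p.2) == v) : Int) := by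
  have hm : ((PySem.List.enumerate answers 0).foldl
        (fun d p =>
          d.insert (PySem.Int.mod p.1 40, p.2) (d.getD (PySem.Int.mod p.1 40, p.2) 0 + 1))
        PySem.Dict.empty)
      = (((PySem.List.enumerate answers 0).map (fun p => (PySem.Int.mod p.1 40, p.2))).foldl
          (fun d x => d.insert x (d.getD x 0 + 1)) (PySem.Dict.empty : PySem.Dict (Int × Int) Int)) :=
    (List.foldl_map (f := fun p : Int × Int => (PySem.Int.mod p.1 40, p.2))
      (g := fun (d : PySem.Dict (Int × Int) Int) x => d.insert x (d.getD x 0 + 1))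
      (l := PySem.List.enumerate answers 0) (init := PySem.Dict.empty)).symm
  rw [hm, PySem.Dict.getD_foldl_insert_add_one]
  simp [List.count_eq_countP, List.countP_map, Function.comp_def]

-- Every index produced by enumerate(answers) is nonnegative.
theorem enumerate_nonneg (answers : List Int) :
    ∀ p ∈ PySem.List.enumerate answers 0, (0:Int) ≤ p.1 := by
  intro p hp
  rw [PySem.List.enumerate_eq_map_pyRange answers 0] at hp
  obtain ⟨j, hj, rfl⟩ := List.mem_map.mp hp
  exact (PySem.List.mem_pyRange_one.mp hj).1

-- B's table-lookup score for one pattern = the direct count A keeps for that pattern.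
theorem score_pattern (answers pat : List Int) (hpos : 0 < pat.length)
    (hdvd : ((pat.length : Int)) ∣ 40) :
    ((PySem.List.pyRange 0 40 1).map (fun r =>
      (((PySem.List.enumerate answers 0).foldl
          (fun d p =>
            d.insert (PySem.Int.mod p.1 40, p.2) (d.getD (PySem.Int.mod p.1 40, p.2) 0 + 1))
          PySem.Dict.empty).getD
        (r, PySem.List.pyGetD pat (PySem.Int.mod r (pat.length : Int)) 0) 0))).sum
    = (List.countP
        (fun i => PySem.List.pyGetD answers i 0
            == PySem.List.pyGetD pat (PySem.Int.mod i (pat.length : Int)) 0)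
        (PySem.List.pyRange 0 (answers.length : Int) 1) : Int) := by
  have hposZ : (0:Int) < (pat.length : Int) := by exact_mod_cast hpos
  have hgh : ∀ x : Int, 0 ≤ x →
      PySem.List.pyGetD pat (PySem.Int.mod (PySem.Int.mod x 40) (pat.length : Int)) 0
        = PySem.List.pyGetD pat (PySem.Int.mod x (pat.length : Int)) 0 := by
    intro x _
    rw [PySem.Int.mod_eq_emod_of_pos hposZ, PySem.Int.mod_eq_emod_of_pos (by norm_num : (0:Int) < 40),
        PySem.Int.mod_eq_emod_of_pos hposZ, Int.emod_emod_of_dvd x hdvd]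
  simp only [hist_getD]
  rw [count_partition _ _ hgh (PySem.List.enumerate answers 0) (enumerate_nonneg answers)]
  rw [PySem.List.enumerate_eq_map_pyRange answers 0, List.countP_map]
  congr 1

-- ===== VERDICT =====
theorem solution_spec : Claim_equal_solution := by
  intro answers _
  unfold Spec_solution
  have hc := foldl_triple_count
      (fun i => PySem.List.pyGetD answers i 0
          == PySem.List.pyGetD [1,2,3,4,5] (PySem.Int.mod i 5) 0)
      (fun i => PySem.List.pyGetD answers i 0
          == PySem.List.pyGetD [2,1,2,3,2,4,2,5] (PySem.Int.mod i 8) 0)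
      (fun i => PySem.List.pyGetD answers i 0
          == PySem.List.pyGetD [3,3,1,1,2,2,4,4,5,5] (PySem.Int.mod i 10) 0)
      (PySem.List.pyRange 0 (answers.length : Int) 1) 0 0 0
  simp only [beq_iff_eq, zero_add] at hc
  have hs1 := score_pattern answers [1,2,3,4,5] (by norm_num) (by norm_num)
  have hs2 := score_pattern answers [2,1,2,3,2,4,2,5] (by norm_num) (by norm_num)
  have hs3 := score_pattern answers [3,3,1,1,2,2,4,4,5,5] (by norm_num) (by norm_num)
  norm_num at hc hs1 hs2 hs3
  simp only [solution, solution_alt, List.map_cons, List.map_nil,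
    List.length_cons, List.length_nil]
  norm_num
  rw [hc, hs1, hs2, hs3]
  set s1 := (↑(List.countP (fun i => PySem.List.pyGetD answers i 0 == PySem.List.pyGetD [1,2,3,4,5] (i % 5) 0) (PySem.List.pyRange 0 (answers.length:Int) 1)) : Int) with hs1'
  set s2 := (↑(List.countP (fun i => PySem.List.pyGetD answers i 0 == PySem.List.pyGetD [2,1,2,3,2,4,2,5] (i % 8) 0) (PySem.List.pyRange 0 (answers.length:Int) 1)) : Int) with hs2'
  set s3 := (↑(List.countP (fun i => PySem.List.pyGetD answers i 0 == PySem.List.pyGetD [3,3,1,1,2,2,4,4,5,5] (i % 10) 0) (PySem.List.pyRange 0 (answers.length:Int) 1)) : Int) with hs3'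
  simp only [List.filter_cons, List.filter_nil, beq_iff_eq]
  split_ifs <;> simp
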